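-- pv_equiv track=rewrite | github.com/theorem46/Yang-Mills-Mass-Gap | 1-Core Validation/exp_core_validation_42_pair_operator_fixedpoint_boundary_v1.py .py | alignment_diamond
-- ===== SOURCE A (Python) =====
-- def alignment_diamond(X):
--     n = len(X)
--     D = [0] * n
--     for i in range(n):
--         if i == 0:
--             D[i] = X[i]  # boundary clamped
--         elif i == n - 1:
--             D[i] = X[i]  # boundary clamped
--         else:
--             D[i] = (X[i - 1] + X[i] + X[i + 1]) // 3
--     return D
-- ===== SOURCE B (Python) =====
-- def alignment_diamond(X):
--     n = len(X)
--     if n <= 2: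
--         return list(X)
--     S = [0]
--     for x in X:
--         S.append(S[-1] + x)
--     return [X[0]] + [(S[i + 2] - S[i - 1]) // 3 for i in range(1, n - 1)] + [X[-1]]
-- ===== Notes on version B (the rewrite author's own statement) =====
-- stated objective: alternative
-- what changed: Replaces the per-index three-term summation of A by a prefix-sum array built in one pass; each interior value is recovered as a difference of two prefix sums (S[i+2]-S[i-1])//3, with clamped endpoints attached around the interior.
import Mathlib
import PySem

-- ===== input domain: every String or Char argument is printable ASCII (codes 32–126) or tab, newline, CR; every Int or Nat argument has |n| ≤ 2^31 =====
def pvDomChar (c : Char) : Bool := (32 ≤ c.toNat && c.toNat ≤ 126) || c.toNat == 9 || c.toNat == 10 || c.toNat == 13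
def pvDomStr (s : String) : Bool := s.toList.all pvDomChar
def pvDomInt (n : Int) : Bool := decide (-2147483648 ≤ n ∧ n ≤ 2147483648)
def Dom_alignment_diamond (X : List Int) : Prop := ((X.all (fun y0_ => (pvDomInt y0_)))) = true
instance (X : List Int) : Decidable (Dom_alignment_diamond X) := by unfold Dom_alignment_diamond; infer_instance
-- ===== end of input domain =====

-- B replaces A's per-index three-term summation by a prefix-sum array built in one pass;
-- each interior value is a difference of two prefix sums, with clamped endpoints attached.

-- ===== PORT A =====
def alignment_diamond (X : List Int) : List Int :=
  let n : Int := X.length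
  (PySem.List.pyRange 0 n 1).foldl
    (fun D i =>
      if i = 0 then PySem.List.pySetD D i (PySem.List.pyGetD X i 0)
      else if i = n - 1 then PySem.List.pySetD D i (PySem.List.pyGetD X i 0)
      else PySem.List.pySetD D i
        (PySem.Int.floordiv
          (PySem.List.pyGetD X (i - 1) 0 + PySem.List.pyGetD X i 0 + PySem.List.pyGetD X (i + 1) 0) 3))
    (List.replicate X.length 0)

-- ===== PORT B =====
def alignment_diamond_alt (X : List Int) : List Int :=
  let n : Int := X.length
  if X.length ≤ 2 then X
  else
    -- S = [0]; for x in X: S.append(S[-1] + x)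
    let S := X.foldl (fun S x => S ++ [PySem.List.pyGetD S (-1) 0 + x]) [0]
    [PySem.List.pyGetD X 0 0] ++
      ((PySem.List.pyRange 1 (n - 1) 1).map (fun i =>
        PySem.Int.floordiv (PySem.List.pyGetD S (i + 2) 0 - PySem.List.pyGetD S (i - 1) 0) 3)) ++
      [PySem.List.pyGetD X (-1) 0]

-- ===== PRECONDITION & SPEC =====
def Spec_alignment_diamond (X : List Int) (out : List Int) : Prop := out = alignment_diamond_alt X
instance (X : List Int) (out : List Int) : Decidable (Spec_alignment_diamond X out) := by unfold Spec_alignment_diamond; infer_instance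

-- ===== CLAIM (what is proved, stated in full; the proofs are below) =====
def Claim_equal_alignment_diamond : Prop := ∀ (X : List Int), Dom_alignment_diamond X → Spec_alignment_diamond X (alignment_diamond X)

-- ===== LEMMAS AND PROOFS =====

-- the common per-index value both programs compute
def pvF (X : List Int) (j : Nat) : Int :=
  if j = 0 then X.getD 0 0
  else if j = X.length - 1 then X.getD j 0
  else PySem.Int.floordiv (X.getD (j - 1) 0 + X.getD j 0 + X.getD (j + 1) 0) 3

-- ---- A-side: characterize the write loop ----

theorem pv_loop_length (g : Nat → Int) :
    ∀ (k : Nat) (D : List Int),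
      ((List.range k).foldl (fun D i => D.set i (g i)) D).length = D.length := by
  intro k
  induction k with
  | zero => intro D; simp
  | succ k ih =>
      intro D
      rw [List.range_succ, List.foldl_append]
      simp [ih]

theorem pv_loop_getD (g : Nat → Int) :
    ∀ (k : Nat) (D : List Int) (j : Nat), j < D.length →
      ((List.range k).foldl (fun D i => D.set i (g i)) D).getD j 0 =
        if j < k then g j else D.getD j 0 := by
  intro k
  induction k with
  | zero => intro D j hj; simp
  | succ k ih =>
      intro D j hj
      rw [List.range_succ, List.foldl_append]
      simp only [List.foldl_cons, List.foldl_nil]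
      rw [List.getD_eq_getElem?_getD, List.getElem?_set]
      have hlen : j < ((List.range k).foldl (fun D i => D.set i (g i)) D).length := by
        rw [pv_loop_length]; exact hj
      by_cases hjk : k = j
      · subst hjk
        rw [if_pos rfl, if_pos hlen]
        simp only [Option.getD_some]
        rw [if_pos (by omega)]
      · rw [if_neg hjk, ← List.getD_eq_getElem?_getD, ih D j hj]
        by_cases h : j < k
        · rw [if_pos h, if_pos (by omega)]
        · rw [if_neg h, if_neg (by omega)]

theorem pv_A_eq_map (X : List Int) :
    alignment_diamond X =
      (List.range X.length).foldl (fun D i => D.set i (pvF X i)) (List.replicate X.length 0) := by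
  simp only [alignment_diamond]
  rw [PySem.List.pyRange_one]
  simp only [sub_zero, Int.toNat_natCast, zero_add, List.foldl_map]
  apply PySem.List.foldl_congr_mem
  intro D k hk
  have hk' : k < X.length := List.mem_range.mp hk
  unfold pvF
  by_cases h0 : k = 0
  · subst h0
    simp [PySem.List.pySetD_of_nonneg, PySem.List.pyGetD_zero, List.getD]
  · have hc0 : ((k : Int) = 0) = False := by simp [h0]
    by_cases hl : k = X.length - 1
    · have : ((k : Int) = (X.length : Int) - 1) := by omega
      simp only [hc0, if_false, if_pos this, if_neg h0, if_pos hl,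
        PySem.List.pySetD_natCast, PySem.List.pyGetD_natCast]
    · have hne : ¬ ((k : Int) = (X.length : Int) - 1) := by omega
      have e1 : (k : Int) - 1 = ((k - 1 : Nat) : Int) := by omega
      have e2 : (k : Int) + 1 = ((k + 1 : Nat) : Int) := by omega
      simp only [hc0, if_false, if_neg hne, if_neg h0, if_neg hl, e1, e2,
        PySem.List.pySetD_natCast, PySem.List.pyGetD_natCast]

theorem pv_A_length (X : List Int) : (alignment_diamond X).length = X.length := by
  rw [pv_A_eq_map, pv_loop_length]; simp

theorem pv_A_getD (X : List Int) (j : Nat) (hj : j < X.length) :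
    (alignment_diamond X).getD j 0 = pvF X j := by
  rw [pv_A_eq_map, pv_loop_getD _ _ _ _ (by simpa using hj)]
  simp [hj]

-- ---- B-side: characterize the prefix-sum loop ----

-- the suffix appended by the loop when started with last accumulated value acc
def pvScan : Int → List Int → List Int
  | _, [] => []
  | acc, x :: t => (acc + x) :: pvScan (acc + x) t

theorem pv_scan_foldl :
    ∀ (X : List Int) (L : List Int) (h : L ≠ []),
      X.foldl (fun S x => S ++ [PySem.List.pyGetD S (-1) 0 + x]) L =
        L ++ pvScan (L.getLast h) X := by
  intro X
  induction X with
  | nil => intro L h; simp [pvScan]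
  | cons x t ih =>
      intro L h
      simp only [List.foldl_cons]
      rw [PySem.List.pyGetD_neg_one L 0 h]
      have hne2 : L ++ [L.getLast h + x] ≠ [] := by simp
      rw [ih (L ++ [L.getLast h + x]) hne2]
      have hgl : (L ++ [L.getLast h + x]).getLast hne2 = L.getLast h + x := by
        simp
      rw [hgl]
      simp [pvScan]

theorem pvScan_length : ∀ (X : List Int) (acc : Int), (pvScan acc X).length = X.length
  | [], _ => by simp [pvScan]
  | x :: t, acc => by simp [pvScan, pvScan_length t]

theorem pvScan_getD : ∀ (X : List Int) (acc : Int) (j : Nat), j < X.length →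
    (pvScan acc X).getD j 0 = acc + (X.take (j + 1)).sum
  | x :: t, acc, 0, _ => by simp [pvScan]
  | x :: t, acc, j + 1, h => by
      have := pvScan_getD t (acc + x) j (by simp at h; omega)
      simp only [pvScan, List.getD_cons_succ, List.take_succ_cons, List.sum_cons, this]
      ring

-- the prefix-sum list S: getD at k is the sum of the first k elements of X
theorem pv_S_getD (X : List Int) (k : Nat) (hk : k ≤ X.length) :
    (X.foldl (fun S x => S ++ [PySem.List.pyGetD S (-1) 0 + x]) [0]).getD k 0 =
      (X.take k).sum := by
  rw [pv_scan_foldl X [0] (by simp)]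
  simp only [List.getLast_singleton]
  cases k with
  | zero => simp
  | succ k =>
      rw [List.getD_eq_getElem?_getD,
        List.getElem?_append_right (by simp),
        ← List.getD_eq_getElem?_getD]
      simp only [List.length_singleton, Nat.add_sub_cancel]
      rw [pvScan_getD X 0 k (by omega)]
      simp

theorem pv_sum_take_succ (X : List Int) (k : Nat) (hk : k < X.length) :
    (X.take (k + 1)).sum = (X.take k).sum + X.getD k 0 := by
  rw [List.take_add_one, List.sum_append]
  simp [List.getElem?_eq_getElem hk]

theorem pv_alt_length (X : List Int) : (alignment_diamond_alt X).length = X.length := by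
  unfold alignment_diamond_alt
  split_ifs with h2
  · rfl
  · simp only [List.length_append, List.length_map, List.length_singleton,
      PySem.List.length_pyRange_one]
    omega

theorem pv_alt_getD (X : List Int) (j : Nat) (hj : j < X.length) :
    (alignment_diamond_alt X).getD j 0 = pvF X j := by
  unfold alignment_diamond_alt
  split_ifs with h2
  · -- n ≤ 2: the result is X itself and every index is a clamped boundary
    unfold pvF
    by_cases hz : j = 0
    · subst hz; simp
    · have hl : j = X.length - 1 := by omega
      rw [if_neg hz, if_pos hl]
  · have h3 : 3 ≤ X.length := by omega
    have hne : X ≠ [] := by intro h; simp [h] at h3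
    by_cases hz : j = 0
    · subst hz
      simp [pvF, PySem.List.pyGetD_zero]
    · rw [List.append_assoc, List.getD_eq_getElem?_getD,
        List.getElem?_append_right (by simp; omega)]
      simp only [List.length_singleton]
      have hml : ((PySem.List.pyRange 1 ((X.length : Int) - 1) 1).map (fun i =>
          PySem.Int.floordiv (PySem.List.pyGetD
              (X.foldl (fun S x => S ++ [PySem.List.pyGetD S (-1) 0 + x]) [0]) (i + 2) 0 -
            PySem.List.pyGetD
              (X.foldl (fun S x => S ++ [PySem.List.pyGetD S (-1) 0 + x]) [0]) (i - 1) 0) 3)).length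
          = X.length - 2 := by
        simp only [List.length_map, PySem.List.length_pyRange_one]; omega
      by_cases hl : j = X.length - 1
      · rw [List.getElem?_append_right (by rw [hml]; omega)]
        have he : j - 1 - (X.length - 2) = 0 := by omega
        rw [hml, he]
        simp only [List.getElem?_cons_zero, Option.getD_some]
        rw [PySem.List.pyGetD_neg_one X 0 hne]
        unfold pvF
        rw [if_neg hz, if_pos hl, List.getLast_eq_getElem]
        rw [List.getD_eq_getElem X 0 (by omega)]
        congr 1; omega
      · rw [List.getElem?_append_left (by rw [hml]; omega), ← List.getD_eq_getElem?_getD,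
          ← PySem.List.pyGetD_natCast,
          PySem.List.pyGetD_map_pyRange_one _ _ _ _ _ (by simp; omega)]
        have e2 : (1 : Int) + (j - 1 : Nat) + 2 = ((j + 2 : Nat) : Int) := by omega
        have e1 : (1 : Int) + (j - 1 : Nat) - 1 = ((j - 1 : Nat) : Int) := by omega
        rw [e1, e2, PySem.List.pyGetD_natCast, PySem.List.pyGetD_natCast]
        rw [pv_S_getD X (j + 2) (by omega), pv_S_getD X (j - 1) (by omega)]
        have s1 := pv_sum_take_succ X (j - 1) (by omega)
        have s2 := pv_sum_take_succ X j (by omega)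
        have s3 := pv_sum_take_succ X (j + 1) (by omega)
        have ej : j - 1 + 1 = j := by omega
        rw [ej] at s1
        unfold pvF
        rw [if_neg hz, if_neg hl]
        congr 1
        have e4 : j + 2 = (j + 1) + 1 := by omega
        rw [e4, s3, s2, s1]
        ring

-- ===== VERDICT (by name: the statement is the Claim_ definition above) =====
theorem alignment_diamond_spec : Claim_equal_alignment_diamond := by
  intro X _
  unfold Spec_alignment_diamond
  apply List.ext_getElem
  · rw [pv_A_length, pv_alt_length]
  · intro j h1 h2
    have hj : j < X.length := by rw [pv_A_length] at h1; exact h1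
    rw [← List.getD_eq_getElem _ 0 h1, ← List.getD_eq_getElem _ 0 h2,
      pv_A_getD X j hj, pv_alt_getD X j hj]
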